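-- pv_equiv track=rewrite | github.com/sunshower1127/Challenges-in-Programmers | level234/29.py | solution
-- ===== SOURCE A (Python) =====
-- def solution(mats, park):
--     mats.sort(reverse=True)
--     height = len(park)
--     width = len(park[0])
--     dp = [[0] * width for _ in range(height)]
--
--     for y in range(height):
--         for x in range(width):
--             if park[y][x] == "-1":
--                 dp[y][x] = min(dp[y - 1][x], dp[y - 1][x - 1], dp[y][x - 1]) + 1
--
--     max_v = max(map(max, dp))
--
--     for v in mats:
--         if v > max_v:
--             continue
--
--         return v
--
--     return -1
-- ===== SOURCE B (Python) =====
-- def solution(mats, park):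
--     # Preserve A's observable in-place sort of mats; the return value is computed
--     # by a completely different method (prefix sums + binary search on the side).
--     mats.sort(reverse=True)
--     h = len(park)
--     w = len(park[0])
--     # 2-D prefix sums counting cells equal to "-1"
--     P = [[0] * (w + 1)]
--     for y in range(h):
--         prev = P[y]
--         row = [0]
--         for x in range(w):
--             row.append(prev[x + 1] + row[x] - prev[x]
--                        + (1 if park[y][x] == "-1" else 0))
--         P.append(row)
--
--     def feasible(k):
--         if k == 0:
--             return True
--         return any(
--             P[i + k][j + k] - P[i][j + k] - P[i + k][j] + P[i][j] == k * k
--             for i in range(h - k + 1)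
--             for j in range(w - k + 1)
--         )
--
--     # Binary search: largest k with some k x k all-"-1" window (monotone in k).
--     lo, hi = 0, min(h, w)
--     while lo < hi:
--         mid = (lo + hi + 1) // 2
--         if feasible(mid):
--             lo = mid
--         else:
--             hi = mid - 1
--     best = lo
--
--     # Largest mat that fits, in one pass.
--     bm = None
--     for m in mats:
--         if m <= best and (bm is None or m > bm):
--             bm = m
--     return bm if bm is not None else -1
-- ===== Notes on version B (the rewrite author's own statement) =====
-- stated objective: alternative
-- what changed: Replaces the largest-square min-DP table (and its separate max(map(max,..)) pass and sort-then-scan mat selection) by a 2-D prefix-sum table counting "-1" cells plus a binary search on the square side k (a k*k window is all "-1" iff its prefix-sum is k*k, and feasibility is monotone in k), and a one-pass max-of-eligible selection over mats; mats.sort is kept only to preserve A's in-place side effect.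
import Mathlib
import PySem

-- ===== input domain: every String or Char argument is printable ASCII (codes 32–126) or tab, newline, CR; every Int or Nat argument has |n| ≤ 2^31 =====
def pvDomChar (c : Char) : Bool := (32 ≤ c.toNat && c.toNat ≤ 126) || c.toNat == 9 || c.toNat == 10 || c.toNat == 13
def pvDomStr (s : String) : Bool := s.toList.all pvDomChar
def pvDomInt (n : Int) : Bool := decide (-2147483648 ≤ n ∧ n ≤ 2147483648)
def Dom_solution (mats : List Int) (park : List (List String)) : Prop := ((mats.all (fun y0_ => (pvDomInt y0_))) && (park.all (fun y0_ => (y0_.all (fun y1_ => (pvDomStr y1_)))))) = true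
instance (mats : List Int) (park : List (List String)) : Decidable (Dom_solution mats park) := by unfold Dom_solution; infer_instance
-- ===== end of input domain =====

-- B replaces A's largest-square min-DP by a 2-D prefix-sum table counting "-1" cells plus a
-- binary search on the square side (a k×k window is all "-1" iff its prefix sum is k*k), and a
-- one-pass max-of-eligible selection over mats (objective: alternative).  A sorts `mats` in
-- place; B's Python reproduces that side effect, and the equivalence proved here is about the
-- RETURN value only.

-- ===== PORT A =====
-- the body of A's inner loop: `if park[y][x] == "-1": dp[y][x] = min(...) + 1`
def bodyA (park : List (List String)) (dp : List (List Int)) (y x : Int) : List (List Int) :=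
  if PySem.List.pyGetD (PySem.List.pyGetD park y []) x "" == "-1" then
    let v := min (PySem.List.pyGetD (PySem.List.pyGetD dp (y - 1) []) x 0)
             (min (PySem.List.pyGetD (PySem.List.pyGetD dp (y - 1) []) (x - 1) 0)
                  (PySem.List.pyGetD (PySem.List.pyGetD dp y []) (x - 1) 0)) + 1
    PySem.List.pySetD dp y (PySem.List.pySetD (PySem.List.pyGetD dp y []) x v)
  else dp

-- A's dp table build plus `max_v = max(map(max, dp))`
def maxvA (park : List (List String)) : Int :=
  let height : Nat := park.length
  let width : Nat := ((PySem.List.pyGet? park 0).getD []).length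
  let dp0 : List (List Int) :=
    (PySem.List.pyRange 0 (height : Int) 1).map (fun _ => PySem.List.pyRepeat [(0 : Int)] (width : Int))
  let dp := (PySem.List.pyRange 0 (height : Int) 1).foldl (fun dp y =>
    (PySem.List.pyRange 0 (width : Int) 1).foldl (fun dp x => bodyA park dp y x) dp) dp0
  (PySem.List.max? (dp.map (fun row => (PySem.List.max? row (fun z => z)).getD 0)) (fun z => z)).getD 0

-- A's final loop: first v in the (descending) list with not (v > max_v), else -1
def findFit (matsS : List Int) (max_v : Int) : Int :=
  match matsS.find? (fun v => !decide (max_v < v)) with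
  | some v => v
  | none => -1

def solution (mats : List Int) (park : List (List String)) : Int :=
  findFit (PySem.List.sorted mats (fun v => v) true) (maxvA park)

-- ===== PORT B =====
-- cell indicator of Source B: 1 if park[y][x] == "-1" else 0 (in-range reads, as Source B performs)
def cellB (park : List (List String)) (y x : Nat) : Int :=
  if ((park.getD y []).getD x "") == "-1" then 1 else 0

-- inner loop of the prefix-sum build: row.append(prev[x+1] + row[x] - prev[x] + cell)
def prowB (park : List (List String)) (w : Nat) (prev : List Int) (y : Nat) : List Int :=
  (List.range w).foldl
    (fun row x => row ++ [prev.getD (x + 1) 0 + row.getD x 0 - prev.getD x 0 + cellB park y x])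
    [0]

-- outer loop of the prefix-sum build: P.append(row)
def buildP (park : List (List String)) (h w : Nat) : List (List Int) :=
  (List.range h).foldl (fun P y => P ++ [prowB park w (P.getD y []) y])
    [List.replicate (w + 1) (0 : Int)]

def pgetB (P : List (List Int)) (a b : Nat) : Int := (P.getD a []).getD b 0

-- feasible(k): some k×k window has prefix-sum k*k
def feasB (P : List (List Int)) (h w k : Nat) : Bool :=
  if k = 0 then true
  else (List.range (h - k + 1)).any (fun i => (List.range (w - k + 1)).any (fun j =>
    pgetB P (i + k) (j + k) - pgetB P i (j + k) - pgetB P (i + k) j + pgetB P i j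
      == (k : Int) * (k : Int)))

-- Source B's `while lo < hi` binary search; fuel only makes the loop structurally recursive
-- (hi - lo decreases by at least 1 each iteration, so fuel = initial hi - lo suffices)
def bsearchB : Nat → (Nat → Bool) → Nat → Nat → Nat
  | 0, _, lo, _ => lo
  | fuel + 1, feas, lo, hi =>
    if lo < hi then
      let mid := (lo + hi + 1) / 2
      if feas mid then bsearchB fuel feas mid hi else bsearchB fuel feas lo (mid - 1)
    else lo

-- best = the binary search's final lo
def bestB (park : List (List String)) : Nat :=
  bsearchB (min park.length (park.headD []).length)
    (feasB (buildP park park.length (park.headD []).length)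
      park.length (park.headD []).length)
    0 (min park.length (park.headD []).length)

-- body of B's one-pass max-of-eligible selection over mats
def bmStep (best : Int) (acc : Option Int) (m : Int) : Option Int :=
  if decide (m ≤ best) && (match acc with | none => true | some b => decide (b < m)) then some m
  else acc

def solution_alt (mats : List Int) (park : List (List String)) : Int :=
  match mats.foldl (bmStep ((bestB park : Nat) : Int)) none with
  | some v => v
  | none => -1

-- ===== PRECONDITION & SPEC =====
-- Pre_ excludes exactly the inputs where A raises: empty park (IndexError at park[0]),
-- empty first row (ValueError at max() of an empty row), and rows shorter than the first
-- row's width (IndexError at park[y][x]).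
def Pre_solution (mats : List Int) (park : List (List String)) : Prop :=
  park ≠ [] ∧ (park.headD []).length ≠ 0 ∧ ∀ row ∈ park, (park.headD []).length ≤ row.length
instance (mats : List Int) (park : List (List String)) : Decidable (Pre_solution mats park) := by
  unfold Pre_solution; infer_instance

def pvWitness_solution : List Int × List (List String) :=
  ([3, 1], [["-1", "-1"], ["-1", "-1"]])

def Spec_solution (mats : List Int) (park : List (List String)) (out : Int) : Prop := out = solution_alt mats park
instance (mats : List Int) (park : List (List String)) (out : Int) : Decidable (Spec_solution mats park out) := by unfold Spec_solution; infer_instance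

-- ===== CLAIM (what is proved, stated in full; the proofs are below) =====
def Claim_equal_solution : Prop := ∀ (mats : List Int) (park : List (List String)), Dom_solution mats park → Pre_solution mats park → Spec_solution mats park (solution mats park)

-- ===== LEMMAS AND PROOFS =====

-- the cell test both programs perform: park[y][x] == "-1" (read with defaults)
def gOf (park : List (List String)) (y x : Nat) : Bool :=
  ((park.getD y []).getD x "") == "-1"

-- the common mathematical object: side of the largest all-"-1" square with
-- bottom-right corner (y, x) — A's DP recurrence
def Dv (g : Nat → Nat → Bool) : Nat → Nat → Int
  | y, x =>
    if g y x then
      if y = 0 ∨ x = 0 then 1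
      else min (Dv g (y - 1) x) (min (Dv g (y - 1) (x - 1)) (Dv g y (x - 1))) + 1
    else 0
  termination_by y x => y + x
  decreasing_by all_goals omega

lemma Dv_zero {g : Nat → Nat → Bool} {y x : Nat} (hg : g y x = false) : Dv g y x = 0 := by
  rw [Dv]; simp [hg]

lemma Dv_boundary {g : Nat → Nat → Bool} {y x : Nat} (hg : g y x = true)
    (hyx : y = 0 ∨ x = 0) : Dv g y x = 1 := by
  rw [Dv]; simp [hg, hyx]

lemma Dv_interior {g : Nat → Nat → Bool} {y x : Nat} (hg : g y x = true)
    (hy : y ≠ 0) (hx : x ≠ 0) :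
    Dv g y x = min (Dv g (y - 1) x) (min (Dv g (y - 1) (x - 1)) (Dv g y (x - 1))) + 1 := by
  rw [Dv]; simp [hg, hy, hx]

lemma Dv_nonneg (g : Nat → Nat → Bool) (y x : Nat) : 0 ≤ Dv g y x := by
  suffices H : ∀ n y x, y + x ≤ n → 0 ≤ Dv g y x from H (y + x) y x le_rfl
  intro n
  induction n with
  | zero =>
    intro y x h
    have hy : y = 0 := by omega
    by_cases hg : g y x
    · rw [Dv_boundary hg (Or.inl hy)]; norm_num
    · rw [Dv_zero (by simpa using hg)]
  | succ k ih =>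
    intro y x h
    by_cases hg : g y x
    · by_cases hyx : y = 0 ∨ x = 0
      · rw [Dv_boundary hg hyx]; norm_num
      · push_neg at hyx
        rw [Dv_interior hg hyx.1 hyx.2]
        have n1 := ih (y - 1) x (by omega)
        have n2 := ih (y - 1) (x - 1) (by omega)
        have n3 := ih y (x - 1) (by omega)
        have := le_min n1 (le_min n2 n3)
        omega
    · rw [Dv_zero (by simpa using hg)]

-- the partially-filled table A's row-major sweep maintains
def ptab (g : Nat → Nat → Bool) (h w y x : Nat) : List (List Int) :=
  (List.range h).map (fun i => (List.range w).map
    (fun j => if i < y ∨ (i = y ∧ j < x) then Dv g i j else 0))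

-- running maximum of Dv over the whole grid (row-major), with floor 0
def Msup (g : Nat → Nat → Bool) (h w : Nat) : Int :=
  (List.range h).foldl (fun a y => (List.range w).foldl (fun a x => max a (Dv g y x)) a) 0

lemma map_range_congr {α : Type} (n : Nat) (f f' : Nat → α) (h : ∀ i, i < n → f i = f' i) :
    (List.range n).map f = (List.range n).map f' :=
  List.map_congr_left (fun i hi => h i (List.mem_range.mp hi))

lemma set_map_range {α : Type} (n k : Nat) (f f' : Nat → α) (v : α)
    (hagree : ∀ i, i ≠ k → f i = f' i) (hv : f' k = v) :
    ((List.range n).map f).set k v = (List.range n).map f' := by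
  apply List.ext_getElem
  · simp
  · intro i h1 h2
    simp only [List.getElem_set, List.getElem_map, List.getElem_range]
    by_cases hik : k = i
    · subst hik; simp [hv]
    · simp [hik, hagree i (fun h => hik h.symm)]

lemma foldmax_le_iff {α : Type} (l : List α) (f : α → Int) (a c : Int) :
    l.foldl (fun acc x => max acc (f x)) a ≤ c ↔ a ≤ c ∧ ∀ x ∈ l, f x ≤ c := by
  induction l generalizing a with
  | nil => simp
  | cons x t ih =>
    simp only [List.foldl_cons, ih, max_le_iff, List.mem_cons]
    constructor
    · rintro ⟨⟨h1, h2⟩, h3⟩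
      exact ⟨h1, fun y hy => hy.elim (fun e => e ▸ h2) (h3 y)⟩
    · rintro ⟨h1, h2⟩
      exact ⟨⟨h1, h2 x (Or.inl rfl)⟩, fun y hy => h2 y (Or.inr hy)⟩

lemma Msup_flat (g : Nat → Nat → Bool) (h w : Nat) :
    Msup g h w = ((List.range h).flatMap (fun y => (List.range w).map (fun x => (y, x)))).foldl
      (fun a (p : Nat × Nat) => max a (Dv g p.1 p.2)) 0 := by
  rw [List.foldl_flatMap]
  simp only [List.foldl_map]
  rfl

lemma Dv_le_Msup (g : Nat → Nat → Bool) (h w y x : Nat) (hy : y < h) (hx : x < w) :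
    Dv g y x ≤ Msup g h w := by
  rw [Msup_flat]
  exact (PySem.List.le_foldl_max_int _ (fun p : Nat × Nat => Dv g p.1 p.2) 0).2 (y, x)
    (by simp only [List.mem_flatMap, List.mem_map, List.mem_range]; exact ⟨y, hy, x, hx, rfl⟩)

lemma Msup_nonneg (g : Nat → Nat → Bool) (h w : Nat) : 0 ≤ Msup g h w := by
  rw [Msup_flat]
  exact (PySem.List.le_foldl_max_int _ (fun p : Nat × Nat => Dv g p.1 p.2) 0).1

-- === reads of ptab ===

lemma ptab_ne_nil (g : Nat → Nat → Bool) (h w y x : Nat) (hh : 0 < h) :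
    ptab g h w y x ≠ [] := by
  unfold ptab
  intro he
  have := congrArg List.length he
  simp at this
  omega

lemma ptab_read (g : Nat → Nat → Bool) (h w y x i j : Nat) (hi : i < h) (hj : j < w) :
    PySem.List.pyGetD (PySem.List.pyGetD (ptab g h w y x) (i : Int) []) (j : Int) 0
      = if i < y ∨ (i = y ∧ j < x) then Dv g i j else 0 := by
  simp only [PySem.List.pyGetD_natCast]
  unfold ptab
  rw [PySem.List.getD_map_range _ _ _ _ hi, PySem.List.getD_map_range _ _ _ _ hj]

lemma pyGetD_nil_int (j : Int) : PySem.List.pyGetD ([] : List Int) j 0 = 0 := by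
  simp [PySem.List.pyGetD, PySem.List.pyGet?, PySem.List.pyIdx?]

lemma ptab_read_nonneg (g : Nat → Nat → Bool) (h w y x : Nat) (i j : Int) :
    0 ≤ PySem.List.pyGetD (PySem.List.pyGetD (ptab g h w y x) i []) j 0 := by
  have hrow : ∀ r, r ∈ ptab g h w y x → ∀ jj : Int, 0 ≤ PySem.List.pyGetD r jj 0 := by
    intro r hr jj
    simp only [ptab, List.mem_map, List.mem_range] at hr
    obtain ⟨ii, -, rfl⟩ := hr
    by_cases hin : PySem.Raise.InRange ((List.range w).map
        (fun j => if ii < y ∨ (ii = y ∧ j < x) then Dv g ii j else 0)).length jj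
    · have hmem := PySem.List.pyGetD_mem _ (i := jj) 0 hin
      simp only [List.mem_map, List.mem_range] at hmem
      obtain ⟨jjj, -, he⟩ := hmem
      rw [← he]
      split_ifs
      · exact Dv_nonneg g ii jjj
      · exact le_refl 0
    · rw [PySem.List.pyGetD_of_none _ _ _ ((PySem.List.pyGet?_eq_none_iff _ _).mpr hin)]
  by_cases hin : PySem.Raise.InRange (ptab g h w y x).length i
  · exact hrow _ (PySem.List.pyGetD_mem _ (i := i) [] hin) j
  · rw [PySem.List.pyGetD_of_none _ _ _ ((PySem.List.pyGet?_eq_none_iff _ _).mpr hin)]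
    exact le_of_eq (pyGetD_nil_int j).symm

-- reading row -1 (Python wraparound to the last row) of ptab
lemma ptab_last (g : Nat → Nat → Bool) (h w y x : Nat) (hh : 0 < h) :
    PySem.List.pyGetD (ptab g h w y x) (-1) []
      = (List.range w).map (fun j => if h - 1 < y ∨ (h - 1 = y ∧ j < x) then Dv g (h - 1) j else 0) := by
  rw [PySem.List.pyGetD_neg_one _ _ (ptab_ne_nil g h w y x hh)]
  unfold ptab
  rw [List.getLast_eq_getElem]
  simp

-- reading entry -1 (wraparound to entry w-1) of a ptab row shape
lemma row_last (f : Nat → Int) (w : Nat) (hw : 0 < w) :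
    PySem.List.pyGetD ((List.range w).map f) (-1) 0 = f (w - 1) := by
  rw [PySem.List.pyGetD_neg_one _ _ (by simp; omega)]
  rw [List.getLast_eq_getElem]
  simp

-- === the write/skip step of A ===

lemma skipA (g : Nat → Nat → Bool) (h w y x : Nat) (hgc : g y x = false) :
    ptab g h w y x = ptab g h w y (x + 1) := by
  unfold ptab
  apply map_range_congr
  intro i hi
  apply map_range_congr
  intro j hj
  by_cases hij : i = y ∧ j = x
  · obtain ⟨rfl, rfl⟩ := hij
    rw [if_neg (by omega), if_pos (by omega), Dv_zero hgc]
  · apply if_congr _ rfl rfl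
    constructor <;> intro <;> omega

lemma writeA (g : Nat → Nat → Bool) (h w y x : Nat) (hy : y < h) (hx : x < w)
    (v : Int) (hv : v = Dv g y x) :
    PySem.List.pySetD (ptab g h w y x) (y : Int)
        (PySem.List.pySetD (PySem.List.pyGetD (ptab g h w y x) (y : Int) []) (x : Int) v)
      = ptab g h w y (x + 1) := by
  rw [PySem.List.pyGetD_natCast]
  conv_lhs => rw [ptab]
  rw [PySem.List.getD_map_range _ _ _ _ hy]
  rw [PySem.List.pySetD_natCast, PySem.List.pySetD_natCast]
  rw [set_map_range w x _ (fun j => if y < y ∨ (y = y ∧ j < x + 1) then Dv g y j else 0) v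
    (fun j hj => by apply if_congr _ rfl rfl; constructor <;> intro <;> omega)
    (by show (if y < y ∨ (y = y ∧ x < x + 1) then Dv g y x else 0) = v
        rw [if_pos (by omega)]; exact hv.symm)]
  rw [set_map_range h y _ (fun i => (List.range w).map
      (fun j => if i < y ∨ (i = y ∧ j < x + 1) then Dv g i j else 0)) _
    (fun i hi => by
      apply map_range_congr
      intro j hj
      apply if_congr _ rfl rfl
      constructor <;> intro <;> omega)
    rfl]
  rfl

lemma stepA (park : List (List String)) (y x : Nat)
    (hy : y < park.length) (hx : x < (park.headD []).length)
    (hh : 0 < park.length) (hw : 0 < (park.headD []).length) :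
    bodyA park (ptab (gOf park) park.length ((park.headD []).length) y x) (y : Int) (x : Int)
      = ptab (gOf park) park.length ((park.headD []).length) y (x + 1) := by
  set g := gOf park with hgdef
  set h := park.length
  set w := (park.headD []).length
  unfold bodyA
  have htest : (PySem.List.pyGetD (PySem.List.pyGetD park (y : Int) []) (x : Int) "" == "-1") = g y x := by
    simp only [PySem.List.pyGetD_natCast]
    rfl
  rw [htest]
  by_cases hgc : g y x
  · rw [if_pos hgc]
    apply writeA g h w y x hy hx
    rcases Nat.eq_zero_or_pos y with hy0 | hy0
    · -- y = 0: dp[y-1] wraps to the (still untouched at column x) last row, so the min is 0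
      subst hy0
      have e1 : ((0 : Nat) : Int) - 1 = -1 := by norm_num
      rw [e1, ptab_last g h w 0 x hh]
      have r1 : PySem.List.pyGetD ((List.range w).map
          (fun j => if h - 1 < 0 ∨ (h - 1 = 0 ∧ j < x) then Dv g (h - 1) j else 0)) (x : Int) 0 = 0 := by
        rw [PySem.List.pyGetD_natCast, PySem.List.getD_map_range _ _ _ _ hx]
        rw [if_neg (by omega)]
      rw [r1]
      have n2 : 0 ≤ PySem.List.pyGetD ((List.range w).map
          (fun j => if h - 1 < 0 ∨ (h - 1 = 0 ∧ j < x) then Dv g (h - 1) j else 0)) ((x : Int) - 1) 0 := by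
        rw [← ptab_last g h w 0 x hh]
        exact ptab_read_nonneg g h w 0 x (-1) ((x : Int) - 1)
      have n3 : 0 ≤ PySem.List.pyGetD
          (PySem.List.pyGetD (ptab g h w 0 x) ((0 : Nat) : Int) []) ((x : Int) - 1) 0 :=
        ptab_read_nonneg g h w 0 x _ _
      rw [min_eq_left (le_min n2 n3), Dv_boundary hgc (Or.inl rfl)]
      norm_num
    · rcases Nat.eq_zero_or_pos x with hx0 | hx0
      · -- y > 0, x = 0: dp[y][x-1] wraps to the untouched end of the current row, so the min is 0
        subst hx0
        have ecol : ((0 : Nat) : Int) - 1 = -1 := by norm_num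
        have erow : ((y : Nat) : Int) - 1 = ((y - 1 : Nat) : Int) := by omega
        rw [ecol, erow]
        have hrowy : PySem.List.pyGetD (ptab g h w y 0) (y : Int) []
            = (List.range w).map (fun j => if y < y ∨ (y = y ∧ j < 0) then Dv g y j else 0) := by
          rw [PySem.List.pyGetD_natCast]
          unfold ptab
          rw [PySem.List.getD_map_range _ _ _ _ hy]
        rw [hrowy, row_last _ w hw, if_neg (by omega)]
        have n1 : 0 ≤ PySem.List.pyGetD
            (PySem.List.pyGetD (ptab g h w y 0) ((y - 1 : Nat) : Int) []) ((0 : Nat) : Int) 0 :=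
          ptab_read_nonneg g h w y 0 _ _
        have n2 : 0 ≤ PySem.List.pyGetD
            (PySem.List.pyGetD (ptab g h w y 0) ((y - 1 : Nat) : Int) []) (-1) 0 :=
          ptab_read_nonneg g h w y 0 _ _
        rw [min_eq_right n2, min_eq_right n1, Dv_boundary hgc (Or.inr rfl)]
        norm_num
      · -- interior cell: the three reads are the three Dv neighbours
        have erow : ((y : Nat) : Int) - 1 = ((y - 1 : Nat) : Int) := by omega
        have ecol : ((x : Nat) : Int) - 1 = ((x - 1 : Nat) : Int) := by omega
        rw [erow, ecol]
        rw [ptab_read g h w y x (y - 1) x (by omega) hx,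
            ptab_read g h w y x (y - 1) (x - 1) (by omega) (by omega),
            ptab_read g h w y x y (x - 1) hy (by omega)]
        rw [if_pos (by omega), if_pos (by omega), if_pos (by omega)]
        rw [Dv_interior hgc (by omega) (by omega)]
  · rw [if_neg (by simp [hgc])]
    exact skipA g h w y x (by simpa using hgc)

lemma ptab_roll (g : Nat → Nat → Bool) (h w y : Nat) :
    ptab g h w y w = ptab g h w (y + 1) 0 := by
  unfold ptab
  apply map_range_congr
  intro i hi
  apply map_range_congr
  intro j hj
  apply if_congr _ rfl rfl
  constructor <;> intro <;> omega

lemma innerA (park : List (List String)) (y : Nat)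
    (hy : y < park.length) (hh : 0 < park.length) (hw : 0 < (park.headD []).length) :
    ∀ n, n ≤ (park.headD []).length →
      (List.range n).foldl (fun dp (x : Nat) => bodyA park dp (↑y) (↑x))
          (ptab (gOf park) park.length ((park.headD []).length) y 0)
        = ptab (gOf park) park.length ((park.headD []).length) y n := by
  intro n
  induction n with
  | zero => simp
  | succ m ih =>
    intro hm
    rw [List.range_succ, List.foldl_append, ih (by omega), List.foldl_cons, List.foldl_nil]
    exact stepA park y m hy (by omega) hh hw

lemma outerA (park : List (List String))
    (hh : 0 < park.length) (hw : 0 < (park.headD []).length) :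
    ∀ n, n ≤ park.length →
      (List.range n).foldl (fun dp (y : Nat) => (List.range ((park.headD []).length)).foldl
          (fun dp (x : Nat) => bodyA park dp (↑y) (↑x)) dp)
          (ptab (gOf park) park.length ((park.headD []).length) 0 0)
        = ptab (gOf park) park.length ((park.headD []).length) n 0 := by
  intro n
  induction n with
  | zero => simp
  | succ m ih =>
    intro hm
    rw [List.range_succ, List.foldl_append, ih (by omega), List.foldl_cons, List.foldl_nil]
    rw [innerA park m (by omega) hh hw _ le_rfl]
    exact ptab_roll _ _ _ _

-- === A's max_v equals Msup ===

lemma width_eq (park : List (List String)) :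
    ((PySem.List.pyGet? park 0).getD []).length = (park.headD []).length := by
  cases park <;> simp [PySem.List.pyGet?, PySem.List.pyIdx?]

lemma maxvA_eq (park : List (List String)) (hne : park ≠ [])
    (hw0 : (park.headD []).length ≠ 0) :
    maxvA park = Msup (gOf park) park.length ((park.headD []).length) := by
  set g := gOf park with hgdef
  set h := park.length with hhdef
  set w := (park.headD []).length with hwdef
  have hh : 0 < h := List.length_pos_iff.mpr hne
  have hw : 0 < w := Nat.pos_of_ne_zero hw0
  unfold maxvA
  rw [width_eq park]
  simp only [← hhdef, ← hwdef]
  simp only [PySem.List.pyRange_zero_nat, List.foldl_map, List.map_map]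
  have hdp0 : (List.range h).map
      ((fun _ => PySem.List.pyRepeat [(0 : Int)] (w : Int)) ∘ (fun k : Nat => (k : Int)))
      = ptab g h w 0 0 := by
    unfold ptab
    apply map_range_congr
    intro i hi
    simp only [Function.comp_apply, PySem.List.pyRepeat_singleton, Int.toNat_natCast]
    rw [show (List.range w).map (fun j => if i < 0 ∨ (i = 0 ∧ j < 0) then Dv g i j else 0)
        = (List.range w).map (fun _ => (0 : Int)) from
      map_range_congr _ _ _ (fun j hj => by rw [if_neg (by omega)])]
    rw [List.map_const', List.length_range]
  rw [hdp0, outerA park hh hw h le_rfl]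
  -- the finished table
  have htab : ptab g h w h 0 = (List.range h).map (fun i => (List.range w).map (fun j => Dv g i j)) := by
    unfold ptab
    apply map_range_congr
    intro i hi
    apply map_range_congr
    intro j hj
    rw [if_pos (Or.inl hi)]
  rw [htab]
  -- now the nested max
  set rowof : Nat → List Int := fun i => (List.range w).map (fun j => Dv g i j) with hrowof
  have rowfact : ∀ i, i < h →
      0 ≤ (PySem.List.max? (rowof i) (fun z => z)).getD 0 ∧
      (PySem.List.max? (rowof i) (fun z => z)).getD 0 ≤ Msup g h w ∧
      ∀ j, j < w → Dv g i j ≤ (PySem.List.max? (rowof i) (fun z => z)).getD 0 := by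
    intro i hi
    rcases hmi : PySem.List.max? (rowof i) (fun z => z) with _ | mi
    · exfalso
      rw [PySem.List.max?_eq_none_iff] at hmi
      have := congrArg List.length hmi
      simp [hrowof] at this
      omega
    · have hmem := PySem.List.max?_mem hmi
      simp only [hrowof, List.mem_map, List.mem_range] at hmem
      obtain ⟨j, hj, rfl⟩ := hmem
      have hmax := PySem.List.max?_isMax hmi
      refine ⟨by simpa using Dv_nonneg g i j, by simpa using Dv_le_Msup g h w i j hi hj, ?_⟩
      intro j' hj'
      simpa using hmax (Dv g i j') (by
        simp only [hrowof, List.mem_map, List.mem_range]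
        exact ⟨j', hj', rfl⟩)
  rcases hM : PySem.List.max? (((List.range h).map rowof).map
      (fun row => (PySem.List.max? row (fun z => z)).getD 0)) (fun z => z) with _ | mm
  · exfalso
    rw [PySem.List.max?_eq_none_iff] at hM
    have := congrArg List.length hM
    simp at this
    omega
  · simp only [Option.getD_some]
    have hmm_mem := PySem.List.max?_mem hM
    simp only [List.mem_map, List.mem_range] at hmm_mem
    obtain ⟨row, ⟨i, hi, rfl⟩, hrow⟩ := hmm_mem
    apply le_antisymm
    · rw [← hrow]
      exact (rowfact i hi).2.1
    · rw [Msup_flat]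
      apply (foldmax_le_iff _ _ _ _).mpr
      constructor
      · rw [← hrow]; exact (rowfact i hi).1
      · intro p hp
        simp only [List.mem_flatMap, List.mem_map, List.mem_range] at hp
        obtain ⟨yy, hyy, xx, hxx, rfl⟩ := hp
        have h1 := (rowfact yy hyy).2.2 xx hxx
        have h2 := PySem.List.max?_isMax hM ((PySem.List.max? (rowof yy) (fun z => z)).getD 0)
          (by
            simp only [List.mem_map, List.mem_range]
            exact ⟨rowof yy, ⟨yy, hyy, rfl⟩, rfl⟩)
        simp only at h2
        exact le_trans h1 h2

-- === B side: prefix sums compute double partial sums of the cell indicator ===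

-- row partial sum and double partial sum of the cell indicator
def rowS (g : Nat → Nat → Bool) (y j : Nat) : Int :=
  ∑ x ∈ Finset.range j, (if g y x then (1 : Int) else 0)

def Ssum (g : Nat → Nat → Bool) (i j : Nat) : Int :=
  ∑ y ∈ Finset.range i, rowS g y j

lemma rowS_zero (g : Nat → Nat → Bool) (y : Nat) : rowS g y 0 = 0 := by
  simp [rowS]

lemma Ssum_zero (g : Nat → Nat → Bool) (j : Nat) : Ssum g 0 j = 0 := by
  simp [Ssum]

lemma Ssum_zero_col (g : Nat → Nat → Bool) (i : Nat) : Ssum g i 0 = 0 := by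
  simp [Ssum, rowS_zero]

lemma Ssum_succ (g : Nat → Nat → Bool) (i j : Nat) :
    Ssum g (i + 1) j = Ssum g i j + rowS g i j :=
  Finset.sum_range_succ _ _

-- the recurrence each appended prefix entry satisfies
lemma Ssum_rec (g : Nat → Nat → Bool) (y x : Nat) :
    Ssum g (y + 1) (x + 1)
      = Ssum g y (x + 1) + Ssum g (y + 1) x - Ssum g y x + (if g y x then (1 : Int) else 0) := by
  rw [Ssum_succ, Ssum_succ, rowS]
  rw [Finset.sum_range_succ]
  ring_nf
  rw [rowS]
  ring

lemma cellB_eq (park : List (List String)) (y x : Nat) :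
    cellB park y x = (if gOf park y x then (1 : Int) else 0) := rfl

-- one row of B's prefix-sum build (prev row abstracted so the induction rewrites cleanly)
lemma prow_fold (park : List (List String)) (w y : Nat) (prev : List Int)
    (hprev : ∀ j, j ≤ w → prev.getD j 0 = Ssum (gOf park) y j) :
    ∀ n, n ≤ w →
      (List.range n).foldl
        (fun row x => row ++ [prev.getD (x + 1) 0 + row.getD x 0 - prev.getD x 0 + cellB park y x])
        [0]
      = (List.range (n + 1)).map (fun j => Ssum (gOf park) (y + 1) j) := by
  set g := gOf park with hg
  intro n
  induction n with
  | zero =>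
    intro _
    simp [Ssum_zero_col]
  | succ m ih =>
    intro hm
    rw [List.range_succ, List.foldl_append, ih (by omega), List.foldl_cons, List.foldl_nil]
    rw [hprev (m + 1) (by omega), hprev m (by omega),
        PySem.List.getD_map_range _ _ _ _ (by omega : m < m + 1)]
    rw [show (List.range (m + 1 + 1)).map (fun j => Ssum g (y + 1) j)
        = (List.range (m + 1)).map (fun j => Ssum g (y + 1) j) ++ [Ssum g (y + 1) (m + 1)] by
      rw [show List.range (m + 1 + 1) = List.range (m + 1) ++ [m + 1] from List.range_succ,
        List.map_append]
      rfl]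
    congr 1
    rw [cellB_eq, ← hg, Ssum_rec g y m]

lemma prow_spec (park : List (List String)) (w y : Nat) :
    prowB park w ((List.range (w + 1)).map (fun j => Ssum (gOf park) y j)) y
      = (List.range (w + 1)).map (fun j => Ssum (gOf park) (y + 1) j) := by
  unfold prowB
  exact prow_fold park w y _
    (fun j hj => PySem.List.getD_map_range _ _ _ _ (by omega)) w le_rfl

-- the whole prefix-sum table
lemma buildP_spec (park : List (List String)) (h w : Nat) :
    buildP park h w = (List.range (h + 1)).map (fun i => (List.range (w + 1)).map
      (fun j => Ssum (gOf park) i j)) := by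
  set g := gOf park with hg
  have h0 : (List.range (w + 1)).map (fun j => Ssum g 0 j) = List.replicate (w + 1) (0 : Int) := by
    rw [show (List.range (w + 1)).map (fun j => Ssum g 0 j)
        = (List.range (w + 1)).map (fun _ => (0 : Int)) from
      map_range_congr _ _ _ (fun j hj => Ssum_zero g j)]
    rw [List.map_const', List.length_range]
  unfold buildP
  suffices H : ∀ n, n ≤ h →
      (List.range n).foldl (fun P y => P ++ [prowB park w (P.getD y []) y])
        [List.replicate (w + 1) (0 : Int)]
      = (List.range (n + 1)).map (fun i => (List.range (w + 1)).map (fun j => Ssum g i j)) by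
    exact H h le_rfl
  intro n
  induction n with
  | zero =>
    intro _
    simp [← h0]
  | succ m ih =>
    intro hm
    rw [List.range_succ, List.foldl_append, ih (by omega), List.foldl_cons, List.foldl_nil]
    rw [show ((List.range (m + 1)).map (fun i => (List.range (w + 1)).map
          (fun j => Ssum g i j))).getD m []
        = (List.range (w + 1)).map (fun j => Ssum g m j) from
      PySem.List.getD_map_range _ _ _ _ (by omega)]
    rw [prow_spec park w m]
    rw [show (List.range (m + 1 + 1)).map (fun i => (List.range (w + 1)).map (fun j => Ssum g i j))
        = (List.range (m + 1)).map (fun i => (List.range (w + 1)).map (fun j => Ssum g i j))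
          ++ [(List.range (w + 1)).map (fun j => Ssum g (m + 1) j)] by
      rw [show List.range (m + 1 + 1) = List.range (m + 1) ++ [m + 1] from List.range_succ,
        List.map_append]
      rfl]

lemma pget_eq (park : List (List String)) (h w a b : Nat) (ha : a ≤ h) (hb : b ≤ w) :
    pgetB (buildP park h w) a b = Ssum (gOf park) a b := by
  unfold pgetB
  rw [buildP_spec]
  rw [PySem.List.getD_map_range _ _ _ _ (by omega : a < h + 1),
      PySem.List.getD_map_range _ _ _ _ (by omega : b < w + 1)]

-- === window sums ===

lemma Ssum_split (g : Nat → Nat → Bool) (i k j : Nat) :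
    Ssum g (i + k) j = Ssum g i j + ∑ a ∈ Finset.range k, rowS g (i + a) j := by
  induction k with
  | zero => simp
  | succ m ih =>
    rw [show i + (m + 1) = (i + m) + 1 by omega, Ssum_succ, ih, Finset.sum_range_succ]
    ring

lemma rowS_split (g : Nat → Nat → Bool) (y j k : Nat) :
    rowS g y (j + k) = rowS g y j + ∑ b ∈ Finset.range k, (if g y (j + b) then (1 : Int) else 0) := by
  induction k with
  | zero => simp
  | succ m ih =>
    rw [show j + (m + 1) = (j + m) + 1 by omega, rowS, Finset.sum_range_succ, ← rowS, ih,
        Finset.sum_range_succ]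
    ring

-- the inclusion–exclusion window sum is the sum of the window's cell indicators
lemma window_sum (g : Nat → Nat → Bool) (i j k : Nat) :
    Ssum g (i + k) (j + k) - Ssum g i (j + k) - Ssum g (i + k) j + Ssum g i j
      = ∑ a ∈ Finset.range k, ∑ b ∈ Finset.range k, (if g (i + a) (j + b) then (1 : Int) else 0) := by
  rw [Ssum_split g i k (j + k), Ssum_split g i k j]
  have : ∑ a ∈ Finset.range k, rowS g (i + a) (j + k)
      = ∑ a ∈ Finset.range k, (rowS g (i + a) j
        + ∑ b ∈ Finset.range k, (if g (i + a) (j + b) then (1 : Int) else 0)) :=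
    Finset.sum_congr rfl (fun a _ => rowS_split g (i + a) j k)
  rw [this, Finset.sum_add_distrib]
  ring

-- a sum of 0/1 terms equals the number of terms iff all terms are 1
lemma sum_ones_iff (k : Nat) (f : Nat → Int) (hf : ∀ b, f b = 0 ∨ f b = 1) :
    (∑ b ∈ Finset.range k, f b) = (k : Int) ↔ ∀ b < k, f b = 1 := by
  have hle : ∀ b ∈ Finset.range k, f b ≤ 1 := fun b _ => by rcases hf b with h | h <;> omega
  have hk : (k : Int) = ∑ _b ∈ Finset.range k, (1 : Int) := by simp
  rw [hk]
  rw [Finset.sum_eq_sum_iff_of_le hle]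
  constructor
  · intro H b hb
    exact H b (Finset.mem_range.mpr hb)
  · intro H b hb
    exact H b (Finset.mem_range.mp hb)

lemma window_all_iff (g : Nat → Nat → Bool) (i j k : Nat) :
    (∑ a ∈ Finset.range k, ∑ b ∈ Finset.range k, (if g (i + a) (j + b) then (1 : Int) else 0))
      = (k : Int) * (k : Int)
    ↔ ∀ a < k, ∀ b < k, g (i + a) (j + b) = true := by
  have hrow : ∀ a, (∑ b ∈ Finset.range k, (if g (i + a) (j + b) then (1 : Int) else 0)) ≤ (k : Int) := by
    intro a
    calc (∑ b ∈ Finset.range k, (if g (i + a) (j + b) then (1 : Int) else 0))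
        ≤ ∑ _b ∈ Finset.range k, (1 : Int) :=
          Finset.sum_le_sum (fun b _ => by split_ifs <;> omega)
      _ = (k : Int) := by simp
  have hkk : (k : Int) * (k : Int) = ∑ _a ∈ Finset.range k, (k : Int) := by
    simp [mul_comm]
  rw [hkk, Finset.sum_eq_sum_iff_of_le (fun a _ => hrow a)]
  constructor
  · intro H a ha b hb
    have := (sum_ones_iff k (fun b => if g (i + a) (j + b) then (1 : Int) else 0)
      (fun b => by rcases Bool.eq_false_or_eq_true (g (i + a) (j + b)) with h | h <;> simp [h])).mp
      (H a (Finset.mem_range.mpr ha)) b hb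
    simpa using this
  · intro H a ha
    exact (sum_ones_iff k (fun b => if g (i + a) (j + b) then (1 : Int) else 0)
      (fun b => by rcases Bool.eq_false_or_eq_true (g (i + a) (j + b)) with h | h <;> simp [h])).mpr
      (fun b hb => by
        simp [H a (Finset.mem_range.mp ha) b hb])

-- === squares versus Dv ===

lemma Dv_le_bounds (g : Nat → Nat → Bool) (y x : Nat) :
    Dv g y x ≤ (y : Int) + 1 ∧ Dv g y x ≤ (x : Int) + 1 := by
  suffices H : ∀ n y x, y + x ≤ n → Dv g y x ≤ (y : Int) + 1 ∧ Dv g y x ≤ (x : Int) + 1 from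
    H (y + x) y x le_rfl
  intro n
  induction n with
  | zero =>
    intro y x h
    have hy : y = 0 := by omega
    by_cases hg : g y x
    · rw [Dv_boundary hg (Or.inl hy)]
      constructor <;> omega
    · rw [Dv_zero (by simpa using hg)]
      constructor <;> omega
  | succ m ih =>
    intro y x h
    by_cases hg : g y x
    · by_cases hyx : y = 0 ∨ x = 0
      · rw [Dv_boundary hg hyx]
        constructor <;> omega
      · push_neg at hyx
        rw [Dv_interior hg hyx.1 hyx.2]
        have h1 := (ih (y - 1) x (by omega)).1
        have h3 := (ih y (x - 1) (by omega)).2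
        have e1 : ((y - 1 : Nat) : Int) = (y : Int) - 1 := by omega
        have e3 : ((x - 1 : Nat) : Int) = (x : Int) - 1 := by omega
        rw [e1] at h1; rw [e3] at h3
        constructor
        · have : min (Dv g (y - 1) x) (min (Dv g (y - 1) (x - 1)) (Dv g y (x - 1)))
              ≤ Dv g (y - 1) x := min_le_left _ _
          omega
        · have : min (Dv g (y - 1) x) (min (Dv g (y - 1) (x - 1)) (Dv g y (x - 1)))
              ≤ Dv g y (x - 1) := le_trans (min_le_right _ _) (min_le_right _ _)
          omega
    · rw [Dv_zero (by simpa using hg)]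
      constructor <;> omega

-- an all-true k×k square with bottom-right (y, x) forces Dv ≥ k
lemma Dv_ge_of_square (g : Nat → Nat → Bool) :
    ∀ k y x, 1 ≤ k → k ≤ y + 1 → k ≤ x + 1 →
      (∀ a b, a < k → b < k → g (y - a) (x - b) = true) → (k : Int) ≤ Dv g y x := by
  intro k
  induction k with
  | zero => intro y x h; omega
  | succ m ih =>
    intro y x _ hy hx hsq
    have hg : g y x = true := by simpa using hsq 0 0 (by omega) (by omega)
    rcases Nat.eq_zero_or_pos m with rfl | hm
    · -- k = 1
      by_cases hyx : y = 0 ∨ x = 0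
      · rw [Dv_boundary hg hyx]; omega
      · push_neg at hyx
        rw [Dv_interior hg hyx.1 hyx.2]
        have n1 := Dv_nonneg g (y - 1) x
        have n2 := Dv_nonneg g (y - 1) (x - 1)
        have n3 := Dv_nonneg g y (x - 1)
        have := le_min n1 (le_min n2 n3)
        omega
    · -- k = m + 1 with m ≥ 1
      have hy1 : y ≠ 0 := by omega
      have hx1 : x ≠ 0 := by omega
      rw [Dv_interior hg hy1 hx1]
      have h1 : (m : Int) ≤ Dv g (y - 1) x := by
        apply ih (y - 1) x hm (by omega) (by omega)
        intro a b ha hb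
        have : (y - 1) - a = y - (a + 1) := by omega
        rw [this]
        exact hsq (a + 1) b (by omega) (by omega)
      have h2 : (m : Int) ≤ Dv g (y - 1) (x - 1) := by
        apply ih (y - 1) (x - 1) hm (by omega) (by omega)
        intro a b ha hb
        have ea : (y - 1) - a = y - (a + 1) := by omega
        have eb : (x - 1) - b = x - (b + 1) := by omega
        rw [ea, eb]
        exact hsq (a + 1) (b + 1) (by omega) (by omega)
      have h3 : (m : Int) ≤ Dv g y (x - 1) := by
        apply ih y (x - 1) hm (by omega) (by omega)
        intro a b ha hb
        have eb : (x - 1) - b = x - (b + 1) := by omega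
        rw [eb]
        exact hsq a (b + 1) (by omega) (by omega)
      have := le_min h1 (le_min h2 h3)
      push_cast
      omega

-- Dv ≥ a, b forces the cell (y - a, x - b) to be true
lemma square_of_Dv (g : Nat → Nat → Bool) :
    ∀ n y x, y + x ≤ n → ∀ a b : Nat, (a : Int) < Dv g y x → (b : Int) < Dv g y x →
      g (y - a) (x - b) = true := by
  intro n
  induction n with
  | zero =>
    intro y x h a b ha hb
    have hy : y = 0 := by omega
    have hx : x = 0 := by omega
    by_cases hg : g y x
    · rw [Dv_boundary hg (Or.inl hy)] at ha hb
      have : a = 0 := by omega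
      have : b = 0 := by omega
      simpa [hy, hx, ‹a = 0›, ‹b = 0›] using hg
    · rw [Dv_zero (by simpa using hg)] at ha
      omega
  | succ m ih =>
    intro y x h a b ha hb
    by_cases hg : g y x
    · by_cases hyx : y = 0 ∨ x = 0
      · rw [Dv_boundary hg hyx] at ha hb
        have ha0 : a = 0 := by omega
        have hb0 : b = 0 := by omega
        simpa [ha0, hb0] using hg
      · push_neg at hyx
        obtain ⟨hy0, hx0⟩ := hyx
        rw [Dv_interior hg hy0 hx0] at ha hb
        set m1 := Dv g (y - 1) x
        set m2 := Dv g (y - 1) (x - 1)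
        set m3 := Dv g y (x - 1)
        have hm1 : min m1 (min m2 m3) ≤ m1 := min_le_left _ _
        have hm2 : min m1 (min m2 m3) ≤ m2 := le_trans (min_le_right _ _) (min_le_left _ _)
        have hm3 : min m1 (min m2 m3) ≤ m3 := le_trans (min_le_right _ _) (min_le_right _ _)
        rcases Nat.eq_zero_or_pos a with rfl | hap
        · rcases Nat.eq_zero_or_pos b with rfl | hbp
          · simpa using hg
          · -- a = 0, b ≥ 1: use the left neighbour
            have h3 := ih y (x - 1) (by omega) 0 (b - 1)
              (by push_cast; omega) (by push_cast; omega)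
            have : (x - 1) - (b - 1) = x - b := by omega
            simpa [this] using h3
        · rcases Nat.eq_zero_or_pos b with rfl | hbp
          · -- b = 0, a ≥ 1: use the top neighbour
            have h1 := ih (y - 1) x (by omega) (a - 1) 0
              (by push_cast; omega) (by push_cast; omega)
            have : (y - 1) - (a - 1) = y - a := by omega
            simpa [this] using h1
          · -- a, b ≥ 1: use the diagonal neighbour
            have h2 := ih (y - 1) (x - 1) (by omega) (a - 1) (b - 1)
              (by push_cast; omega) (by push_cast; omega)
            have ea : (y - 1) - (a - 1) = y - a := by omega
            have eb : (x - 1) - (b - 1) = x - b := by omega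
            simpa [ea, eb] using h2
    · rw [Dv_zero (by simpa using hg)] at ha
      omega

-- === feasibility characterised by Msup ===

lemma Msup_le_min (g : Nat → Nat → Bool) (h w : Nat) :
    Msup g h w ≤ ((min h w : Nat) : Int) := by
  rw [Msup_flat]
  apply (foldmax_le_iff _ _ _ _).mpr
  refine ⟨by positivity, ?_⟩
  intro p hp
  simp only [List.mem_flatMap, List.mem_map, List.mem_range] at hp
  obtain ⟨y, hy, x, hx, rfl⟩ := hp
  obtain ⟨h1, h2⟩ := Dv_le_bounds g y x
  have : (min h w : Nat) = min h w := rfl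
  push_cast
  omega

lemma exists_Dv_ge (g : Nat → Nat → Bool) (h w : Nat) (k : Nat) (hk : 1 ≤ k)
    (hle : (k : Int) ≤ Msup g h w) :
    ∃ y < h, ∃ x < w, (k : Int) ≤ Dv g y x := by
  by_contra hno
  push_neg at hno
  have : Msup g h w ≤ (k : Int) - 1 := by
    rw [Msup_flat]
    apply (foldmax_le_iff _ _ _ _).mpr
    refine ⟨by omega, ?_⟩
    intro p hp
    simp only [List.mem_flatMap, List.mem_map, List.mem_range] at hp
    obtain ⟨y, hy, x, hx, rfl⟩ := hp
    have := hno y hy x hx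
    show Dv g y x ≤ (k : Int) - 1
    omega
  omega

lemma feas_char (park : List (List String)) (h w : Nat)
    (hh : h = park.length) (hw : w = (park.headD []).length) :
    ∀ k, k ≤ min h w →
      (feasB (buildP park h w) h w k = true ↔ (k : Int) ≤ Msup (gOf park) h w) := by
  set g := gOf park with hg
  intro k hk
  rcases Nat.eq_zero_or_pos k with rfl | hk1
  · simp [feasB, Msup_nonneg]
  · have hkh : k ≤ h := le_trans hk (min_le_left _ _)
    have hkw : k ≤ w := le_trans hk (min_le_right _ _)
    unfold feasB
    rw [if_neg (by omega)]
    simp only [List.any_eq_true, List.mem_range, beq_iff_eq]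
    constructor
    · rintro ⟨i, hi, j, hj, hwin⟩
      have hik : i + k ≤ h := by omega
      have hjk : j + k ≤ w := by omega
      rw [pget_eq park h w (i + k) (j + k) hik hjk,
          pget_eq park h w i (j + k) (by omega) hjk,
          pget_eq park h w (i + k) j hik (by omega),
          pget_eq park h w i j (by omega) (by omega)] at hwin
      rw [window_sum] at hwin
      have hall := (window_all_iff g i j k).mp hwin
      -- bottom-right corner of the window
      have hbr : (k : Int) ≤ Dv g (i + k - 1) (j + k - 1) := by
        apply Dv_ge_of_square g k _ _ hk1 (by omega) (by omega)
        intro a b ha hb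
        have ea : i + k - 1 - a = i + (k - 1 - a) := by omega
        have eb : j + k - 1 - b = j + (k - 1 - b) := by omega
        rw [ea, eb]
        exact hall (k - 1 - a) (by omega) (k - 1 - b) (by omega)
      exact le_trans hbr (Dv_le_Msup g h w _ _ (by omega) (by omega))
    · intro hle
      obtain ⟨y, hy, x, hx, hDv⟩ := exists_Dv_ge g h w k hk1 hle
      have hky : k ≤ y + 1 := by
        have := (Dv_le_bounds g y x).1
        omega
      have hkx : k ≤ x + 1 := by
        have := (Dv_le_bounds g y x).2
        omega
      refine ⟨y + 1 - k, by omega, x + 1 - k, by omega, ?_⟩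
      have hik : (y + 1 - k) + k ≤ h := by omega
      have hjk : (x + 1 - k) + k ≤ w := by omega
      rw [pget_eq park h w _ _ hik hjk,
          pget_eq park h w _ _ (by omega) hjk,
          pget_eq park h w _ _ hik (by omega),
          pget_eq park h w _ _ (by omega) (by omega)]
      rw [window_sum, window_all_iff]
      intro a ha b hb
      have ea : y + 1 - k + a = y - (k - 1 - a) := by omega
      have eb : x + 1 - k + b = x - (k - 1 - b) := by omega
      rw [ea, eb]
      exact square_of_Dv g (y + x) y x le_rfl (k - 1 - a) (k - 1 - b)
        (by push_cast; omega) (by push_cast; omega)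

-- === the binary search finds the largest feasible k ===

lemma bsearch_eq (feas : Nat → Bool) (K hi0 : Nat)
    (hchar : ∀ k, k ≤ hi0 → (feas k = true ↔ k ≤ K)) :
    ∀ fuel lo hi, hi - lo ≤ fuel → lo ≤ K → K ≤ hi → hi ≤ hi0 →
      bsearchB fuel feas lo hi = K := by
  intro fuel
  induction fuel with
  | zero =>
    intro lo hi hf h1 h2 h3
    unfold bsearchB
    omega
  | succ m ih =>
    intro lo hi hf h1 h2 h3
    unfold bsearchB
    by_cases hlh : lo < hi
    · rw [if_pos hlh]
      have hmid1 : lo < (lo + hi + 1) / 2 := by omega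
      have hmid2 : (lo + hi + 1) / 2 ≤ hi := by omega
      by_cases hfm : feas ((lo + hi + 1) / 2) = true
      · rw [if_pos hfm]
        have := (hchar _ (by omega)).mp hfm
        exact ih _ _ (by omega) this h2 h3
      · rw [if_neg hfm]
        have hKlt : ¬ ((lo + hi + 1) / 2 ≤ K) := fun hc => hfm ((hchar _ (by omega)).mpr hc)
        exact ih _ _ (by omega) h1 (by omega) (by omega)
    · rw [if_neg hlh]
      omega

lemma bestB_eq (park : List (List String)) :
    ((bestB park : Nat) : Int) = Msup (gOf park) park.length ((park.headD []).length) := by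
  set g := gOf park with hg
  set h := park.length with hh
  set w := (park.headD []).length with hw
  set K : Nat := (Msup g h w).toNat with hK
  have hKc : (K : Int) = Msup g h w := Int.toNat_of_nonneg (Msup_nonneg g h w)
  have hKle : K ≤ min h w := by
    have := Msup_le_min g h w
    omega
  have hchar : ∀ k, k ≤ min h w → ((feasB (buildP park h w) h w k = true) ↔ k ≤ K) := by
    intro k hk
    rw [feas_char park h w hh hw k hk, ← hKc]
    exact Int.ofNat_le
  have : bestB park = K := by
    unfold bestB
    exact bsearch_eq _ K (min h w) hchar (min h w) 0 (min h w) (by omega) (by omega) hKle le_rfl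
  rw [this, hKc]

-- === the two mat selections agree ===

lemma bmfold_none (m : Int) :
    ∀ (l : List Int) (acc : Option Int),
      l.foldl (bmStep m) acc = none ↔ (acc = none ∧ ∀ v ∈ l, ¬ v ≤ m) := by
  intro l
  induction l with
  | nil => simp
  | cons a t ih =>
    intro acc
    rw [List.foldl_cons, ih]
    cases acc with
    | none =>
      by_cases ha : a ≤ m
      · simp [bmStep, ha]
      · simp [bmStep, ha]
        intro _
        omega
    | some b =>
      by_cases ha : a ≤ m <;> by_cases hb : b < a <;> simp [bmStep, ha, hb]

lemma bmfold_some (m : Int) :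
    ∀ (l : List Int) (acc : Option Int) (b : Int), l.foldl (bmStep m) acc = some b →
      ((b ∈ l ∧ b ≤ m) ∨ acc = some b) ∧ (∀ v ∈ l, v ≤ m → v ≤ b) ∧
        (∀ a, acc = some a → a ≤ b) := by
  intro l
  induction l with
  | nil =>
    intro acc b h
    simp only [List.foldl_nil] at h
    subst h
    exact ⟨Or.inr rfl, by simp, fun a ha => by injection ha with ha; omega⟩
  | cons c t ih =>
    intro acc b hfold
    rw [List.foldl_cons] at hfold
    obtain ⟨h1, h2, h3⟩ := ih _ b hfold
    by_cases hc : c ≤ m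
    · cases acc with
      | none =>
        have hstep : bmStep m none c = some c := by simp [bmStep, hc]
        rw [hstep] at h1 h3
        refine ⟨?_, ?_, ?_⟩
        · rcases h1 with ⟨hb1, hb2⟩ | hb
          · exact Or.inl ⟨List.mem_cons_of_mem c hb1, hb2⟩
          · injection hb with hb
            exact Or.inl ⟨by rw [← hb]; exact List.mem_cons_self, by rw [← hb]; exact hc⟩
        · intro v hv hvm
          rcases List.mem_cons.mp hv with rfl | hvt
          · exact h3 v rfl
          · exact h2 v hvt hvm
        · intro a ha
          cases ha
      | some a0 =>
        by_cases hlt : a0 < c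
        · have hstep : bmStep m (some a0) c = some c := by simp [bmStep, hc, hlt]
          rw [hstep] at h1 h3
          have hcb : c ≤ b := h3 c rfl
          refine ⟨?_, ?_, ?_⟩
          · rcases h1 with ⟨hb1, hb2⟩ | hb
            · exact Or.inl ⟨List.mem_cons_of_mem c hb1, hb2⟩
            · injection hb with hb
              exact Or.inl ⟨by rw [← hb]; exact List.mem_cons_self, by rw [← hb]; exact hc⟩
          · intro v hv hvm
            rcases List.mem_cons.mp hv with rfl | hvt
            · exact hcb
            · exact h2 v hvt hvm
          · intro a ha
            injection ha with ha
            omega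
        · have hstep : bmStep m (some a0) c = some a0 := by simp [bmStep, hc, hlt]
          rw [hstep] at h1 h3
          have ha0b : a0 ≤ b := h3 a0 rfl
          refine ⟨?_, ?_, ?_⟩
          · rcases h1 with ⟨hb1, hb2⟩ | hb
            · exact Or.inl ⟨List.mem_cons_of_mem c hb1, hb2⟩
            · exact Or.inr hb
          · intro v hv hvm
            rcases List.mem_cons.mp hv with rfl | hvt
            · omega
            · exact h2 v hvt hvm
          · intro a ha
            injection ha with ha
            omega
    · have hstep : bmStep m acc c = acc := by simp [bmStep, hc]
      rw [hstep] at h1 h3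
      refine ⟨?_, ?_, ?_⟩
      · rcases h1 with ⟨hb1, hb2⟩ | hb
        · exact Or.inl ⟨List.mem_cons_of_mem c hb1, hb2⟩
        · exact Or.inr hb
      · intro v hv hvm
        rcases List.mem_cons.mp hv with rfl | hvt
        · exact absurd hvm hc
        · exact h2 v hvt hvm
      · exact h3

lemma find_sorted_desc (m : Int) :
    ∀ (s : List Int), List.Pairwise (fun a b => b ≤ a) s →
      (match s.find? (fun v => !decide (m < v)) with
       | some v => v ∈ s ∧ v ≤ m ∧ ∀ u ∈ s, u ≤ m → u ≤ v
       | none => ∀ u ∈ s, ¬ u ≤ m) := by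
  intro s
  induction s with
  | nil => simp
  | cons a t ih =>
    intro hp
    rw [List.pairwise_cons] at hp
    obtain ⟨ha, hpt⟩ := hp
    by_cases hm : m < a
    · rw [List.find?_cons_of_neg (by simp [hm])]
      have hrec := ih hpt
      rcases hfind : t.find? (fun v => !decide (m < v)) with _ | v
      · rw [hfind] at hrec
        intro u hu
        rcases List.mem_cons.mp hu with rfl | hut
        · omega
        · exact hrec u hut
      · rw [hfind] at hrec
        obtain ⟨hv1, hv2, hv3⟩ := hrec
        refine ⟨List.mem_cons_of_mem a hv1, hv2, ?_⟩
        intro u hu hum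
        rcases List.mem_cons.mp hu with rfl | hut
        · omega
        · exact hv3 u hut hum
    · rw [List.find?_cons_of_pos (by simp; omega)]
      refine ⟨List.mem_cons_self, by omega, ?_⟩
      intro u hu hum
      rcases List.mem_cons.mp hu with rfl | hut
      · exact le_refl u
      · exact le_trans (ha u hut) (by omega)

lemma findFit_eq (mats : List Int) (m : Int) :
    findFit (PySem.List.sorted mats (fun v => v) true) m =
      (match mats.foldl (bmStep m) none with
       | some v => v
       | none => -1) := by
  set s := PySem.List.sorted mats (fun v => v) true with hs
  have hpair : List.Pairwise (fun a b => b ≤ a) s := by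
    have := PySem.List.sorted_pairwise_rev mats (fun v => v)
    simpa using this
  have hmem : ∀ v : Int, v ∈ s ↔ v ∈ mats := fun v => PySem.List.mem_sorted mats (fun v => v) true v
  have hfind := find_sorted_desc m s hpair
  unfold findFit
  rcases hf : s.find? (fun v => !decide (m < v)) with _ | v
  · rw [hf] at hfind
    rcases hfold : mats.foldl (bmStep m) none with _ | b
    · rfl
    · exfalso
      obtain ⟨h1, -, -⟩ := bmfold_some m mats none b hfold
      rcases h1 with ⟨hb1, hb2⟩ | hb
      · exact hfind b ((hmem b).mpr hb1) hb2
      · cases hb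
  · rw [hf] at hfind
    obtain ⟨hv1, hv2, hv3⟩ := hfind
    rcases hfold : mats.foldl (bmStep m) none with _ | b
    · exfalso
      rw [bmfold_none] at hfold
      exact hfold.2 v ((hmem v).mp hv1) hv2
    · obtain ⟨h1, h2, -⟩ := bmfold_some m mats none b hfold
      rcases h1 with ⟨hb1, hb2⟩ | hb
      · have hbv : b ≤ v := hv3 b ((hmem b).mpr hb1) hb2
        have hvb : v ≤ b := h2 v ((hmem v).mp hv1) hv2
        simp only
        omega
      · cases hb

-- ===== VERDICT (by name: the statement is the Claim_ definition above) =====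
theorem solution_spec : Claim_equal_solution := by
  intro mats park hdom hpre
  obtain ⟨hne, hw0, hrows⟩ := hpre
  unfold Spec_solution
  show solution mats park = solution_alt mats park
  unfold solution solution_alt
  rw [maxvA_eq park hne hw0, ← bestB_eq park]
  exact findFit_eq mats _
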